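-- pv_equiv track=rewrite | github.com/kusotom/FSU | backend/scripts/patch_estoneii_update.py | patch_ini_section
-- ===== SOURCE A (Python) =====
-- def patch_ini_section(content: str, section: str, updates: dict[str, str]) -> str:
--     lines = content.splitlines()
--     out: list[str] = []
--     in_target = False
--     applied: dict[str, bool] = {key: False for key in updates}
--
--     for idx, line in enumerate(lines):
--         stripped = line.strip()
--         is_section = stripped.startswith("[") and stripped.endswith("]")
--         if is_section:
--             if in_target:
--                 for key, done in applied.items():
--                     if not done:
--                         out.append(f"{key} = {updates[key]}")
--                 applied = {key: False for key in updates}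
--             in_target = stripped == section
--             out.append(line)
--             continue
--
--         if in_target:
--             replaced = False
--             for key, value in updates.items():
--                 if stripped.startswith(f"{key}=") or stripped.startswith(f"{key} ="):
--                     prefix = "" if "=" in line[: len(key) + 2] else ""
--                     out.append(f"{key} = {value}")
--                     applied[key] = True
--                     replaced = True
--                     break
--             if replaced:
--                 continue
--         out.append(line)
--
--     if in_target:
--         for key, done in applied.items():
--             if not done:
--                 out.append(f"{key} = {updates[key]}")
--
--     return "\n".join(out) + "\n"
-- ===== SOURCE B (Python) =====
-- def patch_ini_section(content: str, section: str, updates: dict[str, str]) -> str: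
--     def is_header(s: str) -> bool:
--         return s.startswith("[") and s.endswith("]")
--
--     # partition lines into a leading block and (header, body) blocks
--     lines = content.splitlines()
--     lead: list[str] = []
--     blocks: list[tuple[str, list[str]]] = []
--     cur = None
--     for line in lines:
--         if is_header(line.strip()):
--             if cur is not None:
--                 blocks.append(cur)
--             cur = (line, [])
--         else:
--             if cur is None:
--                 lead.append(line)
--             else:
--                 cur = (cur[0], cur[1] + [line])
--     if cur is not None:
--         blocks.append(cur)
--
--     out = list(lead)
--     for header, body in blocks:
--         out.append(header)
--         if header.strip() != section:
--             out.extend(body)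
--         else:
--             remaining = list(updates.items())
--             for line in body:
--                 st = line.strip()
--                 hit = next((kv for kv in updates.items()
--                             if st.startswith(kv[0] + "=") or st.startswith(kv[0] + " =")), None)
--                 if hit is None:
--                     out.append(line)
--                 else:
--                     k, v = hit
--                     out.append(f"{k} = {v}")
--                     remaining = [kv for kv in remaining if kv[0] != k]
--             out.extend(f"{k} = {v}" for k, v in remaining)
--     return "\n".join(out) + "\n"
-- ===== Notes on version B (the rewrite author's own statement) =====
-- stated objective: alternative
-- what changed: B first partitions the lines into a leading block and per-header (header, body) blocks, then emits non-target blocks verbatim and patches target blocks locally with a shrinking remaining-updates list, instead of A's single stateful pass with an in_target flag and an applied-flags dict.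
import Mathlib
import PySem

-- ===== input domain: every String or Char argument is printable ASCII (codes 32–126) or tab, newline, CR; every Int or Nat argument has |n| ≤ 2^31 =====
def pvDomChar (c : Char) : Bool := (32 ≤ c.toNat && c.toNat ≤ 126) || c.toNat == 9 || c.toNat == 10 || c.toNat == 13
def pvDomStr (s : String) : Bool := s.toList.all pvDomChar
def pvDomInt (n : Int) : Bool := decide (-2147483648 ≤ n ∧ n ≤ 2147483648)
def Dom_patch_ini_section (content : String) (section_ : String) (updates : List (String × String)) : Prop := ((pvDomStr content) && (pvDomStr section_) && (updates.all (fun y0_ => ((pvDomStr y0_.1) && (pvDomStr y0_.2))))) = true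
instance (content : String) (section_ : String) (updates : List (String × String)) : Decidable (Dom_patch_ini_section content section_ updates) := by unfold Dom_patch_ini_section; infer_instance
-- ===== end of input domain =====

-- B re-decomposes A's single stateful line pass as partition-into-blocks + local per-block patching; return values proved equal (neither mutates).

-- ===== PORT A =====
-- updates[k] : first-match lookup; every call site passes a key present in updates, so the "" default is never taken
def pvLookup (updates : List (String × String)) (k : String) : String :=
  ((updates.find? (fun kv => kv.1 == k)).map Prod.snd).getD ""

-- A's inner for-loop with break: first update whose "key=" / "key =" prefixes the stripped line
def pvMatchKey (st : String) (updates : List (String × String)) : Option (String × String) :=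
  updates.find? (fun kv => PySem.Str.startswith st (kv.1 ++ "=") || PySem.Str.startswith st (kv.1 ++ " ="))

-- applied = {key: False for key in updates}
def pvApInit (updates : List (String × String)) : PySem.Dict String Bool :=
  updates.foldl (fun d kv => d.insert kv.1 false) PySem.Dict.empty

-- for key, done in applied.items(): if not done: out.append(f"{key} = {updates[key]}")
def pvFlush (updates : List (String × String)) (ap : PySem.Dict String Bool) (out : List String) : List String :=
  ap.items.foldl (fun o kd => if kd.2 then o else o ++ [kd.1 ++ " = " ++ pvLookup updates kd.1]) out

def pvStepA (section_ : String) (updates : List (String × String))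
    (st : List String × Bool × PySem.Dict String Bool) (line : String) :
    List String × Bool × PySem.Dict String Bool :=
  let out := st.1
  let t := st.2.1
  let ap := st.2.2
  let stripped := PySem.Str.strip line
  if PySem.Str.startswith stripped "[" && PySem.Str.endswith stripped "]" then
    ((if t then pvFlush updates ap out else out) ++ [line], stripped == section_,
      if t then pvApInit updates else ap)
  else
    if t then
      match pvMatchKey stripped updates with
      | some kv => (out ++ [kv.1 ++ " = " ++ kv.2], t, ap.insert kv.1 true)
      | none => (out ++ [line], t, ap)
    else (out ++ [line], t, ap)

def patch_ini_section (content : String) (section_ : String) (updates : List (String × String)) : String :=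
  let res := (PySem.Str.splitlines content).foldl (pvStepA section_ updates) ([], false, pvApInit updates)
  PySem.Str.join "\n" (if res.2.1 then pvFlush updates res.2.2 res.1 else res.1) ++ "\n"

-- ===== PORT B =====
def pvIsHeader (s : String) : Bool :=
  PySem.Str.startswith s "[" && PySem.Str.endswith s "]"

-- B's next(...) generator: first update whose "key=" / "key =" prefixes the stripped line
def pvBFind (st : String) (updates : List (String × String)) : Option (String × String) :=
  updates.find? (fun kv => PySem.Str.startswith st (kv.1 ++ "=") || PySem.Str.startswith st (kv.1 ++ " ="))

-- partition into (lead, blocks): fold keeping the currently open block in an Option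
def pvSplitBlocks (lines : List String) : List String × List (String × List String) :=
  let st := lines.foldl
    (fun (acc : List String × List (String × List String) × Option (String × List String)) l =>
      if pvIsHeader (PySem.Str.strip l) then
        match acc.2.2 with
        | some b => (acc.1, acc.2.1 ++ [b], some (l, []))
        | none => (acc.1, acc.2.1, some (l, []))
      else
        match acc.2.2 with
        | none => (acc.1 ++ [l], acc.2.1, none)
        | some b => (acc.1, acc.2.1, some (b.1, b.2 ++ [l])))
    ([], [], none)
  (st.1, st.2.1 ++ (match st.2.2 with | some b => [b] | none => []))

-- patch one target body, tracking the not-yet-applied updates; append them at the end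
def pvPatchBody (updates : List (String × String)) :
    List String → List (String × String) → List String
  | [], remaining => remaining.map (fun kv => kv.1 ++ " = " ++ kv.2)
  | l :: rest, remaining =>
    match pvBFind (PySem.Str.strip l) updates with
    | some kv => (kv.1 ++ " = " ++ kv.2) :: pvPatchBody updates rest (remaining.filter (fun kv' => !(kv'.1 == kv.1)))
    | none => l :: pvPatchBody updates rest remaining

def patch_ini_section_alt (content : String) (section_ : String) (updates : List (String × String)) : String :=
  let p := pvSplitBlocks (PySem.Str.splitlines content)
  let out := p.1 ++ p.2.flatMap (fun b =>
    b.1 :: (if PySem.Str.strip b.1 == section_ then pvPatchBody updates b.2 updates else b.2))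
  PySem.Str.join "\n" out ++ "\n"

-- ===== PRECONDITION & SPEC =====
-- updates models a Python dict[str, str]: its key list is duplicate-free by construction, so Pre_
-- only rules out association lists that correspond to no Python input.
def Pre_patch_ini_section (content : String) (section_ : String) (updates : List (String × String)) : Prop :=
  (updates.map Prod.fst).Nodup

instance (content : String) (section_ : String) (updates : List (String × String)) : Decidable (Pre_patch_ini_section content section_ updates) := by unfold Pre_patch_ini_section; infer_instance

def pvWitness_patch_ini_section : String × String × (List (String × String)) :=
  ("[core]\na=1\nb = 2\n\n[other]\nc=3", "[core]", [("a", "10"), ("x", "y")])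

def Spec_patch_ini_section (content : String) (section_ : String) (updates : List (String × String)) (out : String) : Prop := out = patch_ini_section_alt content section_ updates
instance (content : String) (section_ : String) (updates : List (String × String)) (out : String) : Decidable (Spec_patch_ini_section content section_ updates out) := by unfold Spec_patch_ini_section; infer_instance

-- ===== CLAIM (what is proved, stated in full; the proofs are below) =====
def Claim_equal_patch_ini_section : Prop := ∀ (content : String) (section_ : String) (updates : List (String × String)), Dom_patch_ini_section content section_ updates → Pre_patch_ini_section content section_ updates → Spec_patch_ini_section content section_ updates (patch_ini_section content section_ updates)

-- ===== LEMMAS AND PROOFS =====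

-- ghost state: S = keys applied so far; flags/remaining views of A's dict and B's list
def pvFlags (updates : List (String × String)) (S : List String) : List (String × Bool) :=
  updates.map (fun kv => (kv.1, decide (kv.1 ∈ S)))

def pvRem (updates : List (String × String)) (S : List String) : List (String × String) :=
  updates.filter (fun kv => !decide (kv.1 ∈ S))

-- right-recursive specification of pvSplitBlocks
def pvSplitR : List String → List String × List (String × List String)
  | [] => ([], [])
  | l :: ls =>
    let r := pvSplitR ls
    if pvIsHeader (PySem.Str.strip l) then ([], (l, r.1) :: r.2) else (l :: r.1, r.2)

def pvBlocksOut (section_ : String) (updates : List (String × String))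
    (blocks : List (String × List String)) : List String :=
  blocks.flatMap (fun b =>
    b.1 :: (if PySem.Str.strip b.1 == section_ then pvPatchBody updates b.2 updates else b.2))

-- the fold step of pvSplitBlocks and A's finalization, named for the proofs
def pvSBStep (acc : List String × List (String × List String) × Option (String × List String))
    (l : String) : List String × List (String × List String) × Option (String × List String) :=
  if pvIsHeader (PySem.Str.strip l) then
    match acc.2.2 with
    | some b => (acc.1, acc.2.1 ++ [b], some (l, []))
    | none => (acc.1, acc.2.1, some (l, []))
  else
    match acc.2.2 with
    | none => (acc.1 ++ [l], acc.2.1, none)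
    | some b => (acc.1, acc.2.1, some (b.1, b.2 ++ [l]))

def pvSBFin (st : List String × List (String × List String) × Option (String × List String)) :
    List String × List (String × List String) :=
  (st.1, st.2.1 ++ (match st.2.2 with | some b => [b] | none => []))

def pvFinA (updates : List (String × String))
    (res : List String × Bool × PySem.Dict String Bool) : List String :=
  if res.2.1 then pvFlush updates res.2.2 res.1 else res.1

theorem pvSplitR_cons_header {l : String} (ls : List String)
    (h : pvIsHeader (PySem.Str.strip l) = true) :
    pvSplitR (l :: ls) = ([], (l, (pvSplitR ls).1) :: (pvSplitR ls).2) := by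
  simp [pvSplitR, h]

theorem pvSplitR_cons_plain {l : String} (ls : List String)
    (h : pvIsHeader (PySem.Str.strip l) = false) :
    pvSplitR (l :: ls) = (l :: (pvSplitR ls).1, (pvSplitR ls).2) := by
  simp [pvSplitR, h]

theorem pvBlocksOut_nil (section_ : String) (updates : List (String × String)) :
    pvBlocksOut section_ updates [] = [] := rfl

theorem pvBlocksOut_cons (section_ : String) (updates : List (String × String))
    (b : String × List String) (bs : List (String × List String)) :
    pvBlocksOut section_ updates (b :: bs)
      = b.1 :: ((if PySem.Str.strip b.1 == section_ then pvPatchBody updates b.2 updates else b.2)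
          ++ pvBlocksOut section_ updates bs) := by
  simp [pvBlocksOut]

theorem pv_sb_some : ∀ (lines lead : List String) (blocks : List (String × List String))
    (h : String) (body : List String),
    pvSBFin (lines.foldl pvSBStep (lead, blocks, some (h, body)))
      = (lead, blocks ++ (h, body ++ (pvSplitR lines).1) :: (pvSplitR lines).2) := by
  intro lines
  induction lines with
  | nil => intro lead blocks h body; simp [pvSBFin, pvSplitR]
  | cons l ls ih =>
    intro lead blocks h body
    cases hb : pvIsHeader (PySem.Str.strip l) with
    | true =>
      simp only [List.foldl_cons, pvSBStep, hb, reduceIte]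
      rw [ih, pvSplitR_cons_header ls hb]
      simp
    | false =>
      simp only [List.foldl_cons, pvSBStep, hb, Bool.false_eq_true, reduceIte]
      rw [ih, pvSplitR_cons_plain ls hb]
      simp
theorem pv_sb_none : ∀ (lines lead : List String) (blocks : List (String × List String)),
    pvSBFin (lines.foldl pvSBStep (lead, blocks, none))
      = (lead ++ (pvSplitR lines).1, blocks ++ (pvSplitR lines).2) := by
  intro lines
  induction lines with
  | nil => intro lead blocks; simp [pvSBFin, pvSplitR]
  | cons l ls ih =>
    intro lead blocks
    cases hb : pvIsHeader (PySem.Str.strip l) with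
    | true =>
      simp only [List.foldl_cons, pvSBStep, hb, reduceIte]
      rw [pv_sb_some ls lead blocks l [], pvSplitR_cons_header ls hb]
      simp
    | false =>
      simp only [List.foldl_cons, pvSBStep, hb, Bool.false_eq_true, reduceIte]
      rw [ih, pvSplitR_cons_plain ls hb]
      simp

theorem pv_splitBlocks_eq (lines : List String) : pvSplitBlocks lines = pvSplitR lines := by
  have h := pv_sb_none lines [] []
  simpa [pvSBFin] using h

theorem pv_lookup_self (updates : List (String × String))
    (hnd : (updates.map Prod.fst).Nodup) (kv : String × String) (hmem : kv ∈ updates) :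
    pvLookup updates kv.1 = kv.2 := by
  induction updates with
  | nil => cases hmem
  | cons u us ih =>
    simp only [List.map_cons, List.nodup_cons] at hnd
    rcases List.mem_cons.mp hmem with h | h
    · subst h; simp [pvLookup]
    · have hne : ¬ (u.1 == kv.1) = true := by
        intro hc
        exact hnd.1 (by
          have : u.1 = kv.1 := by simpa using hc
          rw [this]
          exact List.mem_map_of_mem h)
      simp only [pvLookup, List.find?_cons, hne]
      exact ih hnd.2 h

theorem pvFlags_cons (kv : String × String) (us : List (String × String)) (S : List String) :
    pvFlags (kv :: us) S = (kv.1, decide (kv.1 ∈ S)) :: pvFlags us S := rfl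

theorem pv_flush_aux (updates : List (String × String)) (S : List String)
    (hnd : (updates.map Prod.fst).Nodup) :
    ∀ (us : List (String × String)) (out : List String), (∀ kv ∈ us, kv ∈ updates) →
    (pvFlags us S).foldl
        (fun o kd => if kd.2 then o else o ++ [kd.1 ++ " = " ++ pvLookup updates kd.1]) out
      = out ++ (pvRem us S).map (fun kv => kv.1 ++ " = " ++ kv.2) := by
  intro us
  induction us with
  | nil => intro out _; simp [pvFlags, pvRem]
  | cons kv us' ih =>
    intro out hsub
    have hlook : pvLookup updates kv.1 = kv.2 :=
      pv_lookup_self updates hnd kv (hsub kv (List.mem_cons_self))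
    rw [pvFlags_cons, List.foldl_cons]
    by_cases hS : kv.1 ∈ S
    · rw [if_pos (by simpa using hS),
        ih out (fun x hx => hsub x (List.mem_cons_of_mem _ hx))]
      have hr : pvRem (kv :: us') S = pvRem us' S := by simp [pvRem, hS]
      rw [hr]
    · rw [if_neg (by simpa using hS), hlook,
        ih _ (fun x hx => hsub x (List.mem_cons_of_mem _ hx))]
      have hr : pvRem (kv :: us') S = kv :: pvRem us' S := by simp [pvRem, hS]
      rw [hr]
      simp

theorem pv_flush_flags (updates : List (String × String)) (S : List String)
    (hnd : (updates.map Prod.fst).Nodup) (ap : PySem.Dict String Bool)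
    (hap : ap.items = pvFlags updates S) (out : List String) :
    pvFlush updates ap out = out ++ (pvRem updates S).map (fun kv => kv.1 ++ " = " ++ kv.2) := by
  unfold pvFlush
  rw [hap]
  exact pv_flush_aux updates S hnd updates out (fun kv h => h)

theorem pv_apInit_items (updates : List (String × String))
    (hnd : (updates.map Prod.fst).Nodup) :
    (pvApInit updates).items = pvFlags updates [] := by
  have h := PySem.Dict.items_foldl_insert_fresh updates Prod.fst
    (fun _ => (false : Bool)) PySem.Dict.empty
    (fun a _ => PySem.Dict.contains_empty _) hnd
  simpa [pvApInit, pvFlags] using h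

theorem pv_flags_insert (updates : List (String × String)) (S : List String)
    (ap : PySem.Dict String Bool) (k : String)
    (hap : ap.items = pvFlags updates S) (hk : k ∈ updates.map Prod.fst) :
    (ap.insert k true).items = pvFlags updates (k :: S) := by
  have hc : ap.contains k = true := by
    rw [PySem.Dict.contains_iff_mem_keys]
    simp only [PySem.Dict.keys, hap, pvFlags, List.map_map]
    simpa using hk
  rw [PySem.Dict.items_insert_of_contains ap true hc, hap]
  unfold pvFlags
  rw [List.map_map]
  apply List.map_congr_left
  intro kv _
  by_cases he : kv.1 = k
  · simp [Function.comp, he]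
  · simp [Function.comp, he, List.mem_cons, Ne.symm he]

theorem pv_rem_filter (updates : List (String × String)) (S : List String) (k : String) :
    (pvRem updates S).filter (fun kv' => !(kv'.1 == k)) = pvRem updates (k :: S) := by
  unfold pvRem
  rw [List.filter_filter]
  apply List.filter_congr
  intro kv _
  by_cases he : kv.1 = k <;> by_cases hS : kv.1 ∈ S <;> simp [he, hS]

theorem pv_bfind_eq (st : String) (updates : List (String × String)) :
    pvBFind st updates = pvMatchKey st updates := rfl

theorem pvPatchBody_cons_some {updates : List (String × String)} {l : String}
    {kv : String × String} (rest : List String) (rem : List (String × String))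
    (hf : pvBFind (PySem.Str.strip l) updates = some kv) :
    pvPatchBody updates (l :: rest) rem
      = (kv.1 ++ " = " ++ kv.2)
          :: pvPatchBody updates rest (rem.filter (fun kv' => !(kv'.1 == kv.1))) := by
  simp [pvPatchBody, hf]

theorem pvPatchBody_cons_none {updates : List (String × String)} {l : String}
    (rest : List String) (rem : List (String × String))
    (hf : pvBFind (PySem.Str.strip l) updates = none) :
    pvPatchBody updates (l :: rest) rem = l :: pvPatchBody updates rest rem := by
  simp [pvPatchBody, hf]

theorem pvStepA_header {section_ : String} {updates : List (String × String)} {l : String}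
    (out : List String) (t : Bool) (ap : PySem.Dict String Bool)
    (hb : (PySem.Str.startswith (PySem.Str.strip l) "[" &&
           PySem.Str.endswith (PySem.Str.strip l) "]") = true) :
    pvStepA section_ updates (out, t, ap) l
      = ((if t then pvFlush updates ap out else out) ++ [l],
         (PySem.Str.strip l == section_), if t then pvApInit updates else ap) := by
  simp only [pvStepA, hb, Bool.false_eq_true, reduceIte]

theorem pvStepA_match {section_ : String} {updates : List (String × String)} {l : String}
    {kv : String × String} (out : List String) (ap : PySem.Dict String Bool)
    (hb : (PySem.Str.startswith (PySem.Str.strip l) "[" &&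
           PySem.Str.endswith (PySem.Str.strip l) "]") = false)
    (hf : pvMatchKey (PySem.Str.strip l) updates = some kv) :
    pvStepA section_ updates (out, true, ap) l
      = (out ++ [kv.1 ++ " = " ++ kv.2], true, ap.insert kv.1 true) := by
  simp only [pvStepA, hb, hf, Bool.false_eq_true, reduceIte]

theorem pvStepA_nomatch {section_ : String} {updates : List (String × String)} {l : String}
    (out : List String) (ap : PySem.Dict String Bool)
    (hb : (PySem.Str.startswith (PySem.Str.strip l) "[" &&
           PySem.Str.endswith (PySem.Str.strip l) "]") = false)
    (hf : pvMatchKey (PySem.Str.strip l) updates = none) :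
    pvStepA section_ updates (out, true, ap) l = (out ++ [l], true, ap) := by
  simp only [pvStepA, hb, hf, Bool.false_eq_true, reduceIte]

theorem pvStepA_plain {section_ : String} {updates : List (String × String)} {l : String}
    (out : List String) (ap : PySem.Dict String Bool)
    (hb : (PySem.Str.startswith (PySem.Str.strip l) "[" &&
           PySem.Str.endswith (PySem.Str.strip l) "]") = false) :
    pvStepA section_ updates (out, false, ap) l = (out ++ [l], false, ap) := by
  simp only [pvStepA, hb, Bool.false_eq_true, reduceIte]

theorem pv_rem_nil (updates : List (String × String)) : pvRem updates [] = updates := by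
  simp [pvRem]

theorem pv_main (section_ : String) (updates : List (String × String))
    (hnd : (updates.map Prod.fst).Nodup) :
    ∀ (lines out : List String) (t : Bool) (ap : PySem.Dict String Bool) (S : List String),
      ap.items = pvFlags updates S →
      (t = false → S = []) →
      pvFinA updates (lines.foldl (pvStepA section_ updates) (out, t, ap))
      = out ++ (if t then pvPatchBody updates (pvSplitR lines).1 (pvRem updates S)
                        ++ pvBlocksOut section_ updates (pvSplitR lines).2
                else (pvSplitR lines).1 ++ pvBlocksOut section_ updates (pvSplitR lines).2) := by
  intro lines
  induction lines with
  | nil =>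
    intro out t ap S hap ht
    cases t with
    | false => simp [pvFinA, pvSplitR, pvBlocksOut_nil]
    | true =>
      simp only [List.foldl_nil]
      show pvFlush updates ap out = _
      rw [pv_flush_flags updates S hnd ap hap out]
      simp [pvSplitR, pvBlocksOut_nil, pvPatchBody]
  | cons l ls ih =>
    intro out t ap S hap ht
    rw [List.foldl_cons]
    cases hb : (PySem.Str.startswith (PySem.Str.strip l) "[" &&
        PySem.Str.endswith (PySem.Str.strip l) "]") with
    | true =>
      have hh : pvIsHeader (PySem.Str.strip l) = true := hb
      cases t with
      | true =>
        rw [pvStepA_header out true ap hb]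
        simp only [if_pos]
        rw [ih (pvFlush updates ap out ++ [l]) (PySem.Str.strip l == section_)
              (pvApInit updates) [] (pv_apInit_items updates hnd) (fun _ => rfl),
            pv_flush_flags updates S hnd ap hap out,
            pvSplitR_cons_header ls hh, pv_rem_nil]
        cases hsec : (PySem.Str.strip l == section_) with
        | true =>
          simp only [hsec, reduceIte, pvBlocksOut_cons, pvPatchBody]
          simp [hsec]
        | false =>
          simp only [hsec, Bool.false_eq_true, reduceIte, pvBlocksOut_cons, pvPatchBody]
          simp [hsec]
      | false =>
        have hS : S = [] := ht rfl
        subst hS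
        rw [pvStepA_header out false ap hb]
        simp only [Bool.false_eq_true, reduceIte]
        rw [ih (out ++ [l]) (PySem.Str.strip l == section_) ap [] hap (fun _ => rfl),
            pvSplitR_cons_header ls hh, pv_rem_nil]
        cases hsec : (PySem.Str.strip l == section_) with
        | true =>
          simp only [hsec, reduceIte, pvBlocksOut_cons]
          simp [hsec]
        | false =>
          simp only [hsec, Bool.false_eq_true, reduceIte, pvBlocksOut_cons]
          simp [hsec]
    | false =>
      have hh : pvIsHeader (PySem.Str.strip l) = false := hb
      cases t with
      | true =>
        cases hfind : pvMatchKey (PySem.Str.strip l) updates with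
        | some kv =>
          have hmem : kv ∈ updates := List.mem_of_find?_eq_some hfind
          rw [pvStepA_match out ap hb hfind,
            ih (out ++ [kv.1 ++ " = " ++ kv.2]) true (ap.insert kv.1 true) (kv.1 :: S)
              (pv_flags_insert updates S ap kv.1 hap (List.mem_map_of_mem hmem))
              (by simp),
            pvSplitR_cons_plain ls hh]
          simp only [if_pos]
          rw [pvPatchBody_cons_some (pvSplitR ls).1 (pvRem updates S)
              (by rw [pv_bfind_eq]; exact hfind), pv_rem_filter]
          simp
        | none =>
          rw [pvStepA_nomatch out ap hb hfind,
            ih (out ++ [l]) true ap S hap (by simp),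
            pvSplitR_cons_plain ls hh]
          simp only [if_pos]
          rw [pvPatchBody_cons_none (pvSplitR ls).1 (pvRem updates S)
              (by rw [pv_bfind_eq]; exact hfind)]
          simp
      | false =>
        have hS : S = [] := ht rfl
        subst hS
        rw [pvStepA_plain out ap hb,
          ih (out ++ [l]) false ap [] hap (fun _ => rfl),
          pvSplitR_cons_plain ls hh]
        simp

-- ===== VERDICT (by name: the statement is the Claim_ definition above) =====
theorem patch_ini_section_spec : Claim_equal_patch_ini_section := by
  intro content section_ updates _ hpre
  show patch_ini_section content section_ updates = patch_ini_section_alt content section_ updates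
  have h := pv_main section_ updates hpre (PySem.Str.splitlines content) [] false
    (pvApInit updates) [] (pv_apInit_items updates hpre) (fun _ => rfl)
  unfold patch_ini_section patch_ini_section_alt
  rw [pv_splitBlocks_eq]
  show PySem.Str.join "\n"
      (pvFinA updates ((PySem.Str.splitlines content).foldl (pvStepA section_ updates)
        ([], false, pvApInit updates))) ++ "\n" = _
  rw [h]
  simp [pvBlocksOut]
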